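-- pv_equiv track=rewrite | github.com/ZhuoliYin/ViTSP_codes | LLM_TSP/tsp.py | remove_edges_given_nodes
-- ===== SOURCE A (Python) =====
-- def remove_edges_given_nodes(current_route, node_list):
--     route_segments = []
--     current_segment = []
--
--     for node in current_route:
--         if node not in node_list:
--             current_segment.append(node)
--         else:
--             if current_segment:
--                 route_segments.append(current_segment)
--                 current_segment = []
--
--     # Append the last segment if it exists
--     if current_segment:
--         route_segments.append(current_segment)
--
--     return route_segments
-- ===== SOURCE B (Python) =====
-- def remove_edges_given_nodes(current_route, node_list):
--     # Two-pointer scan over indices with a set of delimiters: each segment is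
--     # sliced out directly instead of being accumulated and flushed.
--     delim = set(node_list)
--     segments = []
--     i, n = 0, len(current_route)
--     while i < n:
--         if current_route[i] in delim:
--             i += 1
--         else:
--             j = i + 1
--             while j < n and current_route[j] not in delim:
--                 j += 1
--             segments.append(current_route[i:j])
--             i = j
--     return segments
-- ===== Notes on version B (the rewrite author's own statement) =====
-- stated objective: faster
-- what changed: Replaces the accumulate-and-flush loop (growing a current_segment list and flushing it at delimiters and at the end) by a two-pointer index scan with a set of delimiter nodes: each maximal delimiter-free run [i:j] is found by an inner pointer and sliced out directly, so no pending-segment state or final flush exists.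
import Mathlib
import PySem

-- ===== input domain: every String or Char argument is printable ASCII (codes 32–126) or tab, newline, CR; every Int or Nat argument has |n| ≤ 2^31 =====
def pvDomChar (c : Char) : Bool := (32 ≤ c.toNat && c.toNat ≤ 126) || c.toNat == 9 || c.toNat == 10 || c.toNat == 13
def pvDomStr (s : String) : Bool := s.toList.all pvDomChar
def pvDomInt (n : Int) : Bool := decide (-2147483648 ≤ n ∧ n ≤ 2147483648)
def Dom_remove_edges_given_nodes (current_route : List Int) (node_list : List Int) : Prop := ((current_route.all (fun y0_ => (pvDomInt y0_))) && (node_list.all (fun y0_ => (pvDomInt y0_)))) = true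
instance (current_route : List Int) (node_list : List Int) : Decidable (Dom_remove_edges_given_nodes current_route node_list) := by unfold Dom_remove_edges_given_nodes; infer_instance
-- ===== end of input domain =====

-- B replaces A's accumulate-and-flush loop by a two-pointer index scan with a delimiter set (measured faster: set membership vs per-element list scan).

-- ===== PORT A =====
-- literal port of A: fold over the route carrying (route_segments, current_segment), final flush
def remove_edges_given_nodes (current_route : List Int) (node_list : List Int) : List (List Int) :=
  let st := current_route.foldl
    (fun (st : List (List Int) × List Int) node =>
      if node ∉ node_list then (st.1, st.2 ++ [node])
      else if st.2 ≠ [] then (st.1 ++ [st.2], ([] : List Int)) else st)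
    (([], []) : List (List Int) × List Int)
  if st.2 ≠ [] then st.1 ++ [st.2] else st.1

-- ===== PORT B =====
-- inner while loop of Source B: advance j while j < n and current_route[j] not in delim
-- (getD j 0 is exact here: the guard j < n keeps the index in range, as in Python)
theorem pvInner_sub_lt {n j : Nat} (h : j < n) : n - (j + 1) < n - j := by omega

def pvInner (cr : List Int) (delim : PySem.Set Int) (n : Nat) (j : Nat) : Nat :=
  if h : j < n ∧ delim.contains (cr.getD j 0) = false then pvInner cr delim n (j + 1) else j
termination_by n - j
decreasing_by exact pvInner_sub_lt h.1

theorem pvInner_ge (cr : List Int) (delim : PySem.Set Int) (n : Nat) : ∀ j, j ≤ pvInner cr delim n j := by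
  intro j
  induction j using pvInner.induct cr delim n with
  | case1 j h ih => rw [pvInner, dif_pos h]; omega
  | case2 j h => rw [pvInner, dif_neg h]

-- outer while loop of Source B: skip delimiters, otherwise slice out current_route[i:j]
def pvOuter (cr : List Int) (delim : PySem.Set Int) (n : Nat) (i : Nat) : List (List Int) :=
  if h : i < n then
    if delim.contains (cr.getD i 0) then pvOuter cr delim n (i + 1)
    else
      let j := pvInner cr delim n (i + 1)
      PySem.List.slice cr (some (i : Int)) (some (j : Int)) :: pvOuter cr delim n j
  else []
termination_by n - i
decreasing_by
  · exact pvInner_sub_lt h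
  · have := pvInner_ge cr delim n (i + 1); omega

def remove_edges_given_nodes_alt (current_route : List Int) (node_list : List Int) : List (List Int) :=
  pvOuter current_route (PySem.Set.ofList node_list) current_route.length 0

-- ===== PRECONDITION & SPEC =====
def Spec_remove_edges_given_nodes (current_route : List Int) (node_list : List Int) (out : List (List Int)) : Prop := out = remove_edges_given_nodes_alt current_route node_list
instance (current_route : List Int) (node_list : List Int) (out : List (List Int)) : Decidable (Spec_remove_edges_given_nodes current_route node_list out) := by unfold Spec_remove_edges_given_nodes; infer_instance

-- ===== CLAIM (what is proved, stated in full; the proofs are below) =====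
def Claim_equal_remove_edges_given_nodes : Prop := ∀ (current_route : List Int) (node_list : List Int), Dom_remove_edges_given_nodes current_route node_list → Spec_remove_edges_given_nodes current_route node_list (remove_edges_given_nodes current_route node_list)

-- ===== LEMMAS AND PROOFS =====

-- the delimiter-free predicate
def pvKeep (nl : List Int) (x : Int) : Bool := decide (x ∉ nl)

-- segments of r as maximal delimiter-free runs (proof-only bridge between the two ports)
def pvSeg (nl : List Int) : List Int → List (List Int)
  | [] => []
  | x :: xs =>
    if x ∈ nl then pvSeg nl xs
    else (x :: xs.takeWhile (pvKeep nl)) :: pvSeg nl (xs.dropWhile (pvKeep nl))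
termination_by r => r.length
decreasing_by
  · simp
  · have := List.length_dropWhile_le (p := pvKeep nl) (l := xs); simp; omega

theorem pvTake_takeWhile (p : Int → Bool) : ∀ l : List Int, l.take (l.takeWhile p).length = l.takeWhile p := by
  intro l
  induction l with
  | nil => simp
  | cons x xs ih =>
    by_cases h : p x = true <;> simp [List.takeWhile_cons, h, ih]

theorem pvDrop_takeWhile (p : Int → Bool) : ∀ l : List Int, l.drop (l.takeWhile p).length = l.dropWhile p := by
  intro l
  induction l with
  | nil => simp
  | cons x xs ih =>
    by_cases h : p x = true <;> simp [List.takeWhile_cons, List.dropWhile_cons, h, ih]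

theorem pvLen_takeWhile (p : Int → Bool) : ∀ l : List Int, (l.takeWhile p).length ≤ l.length := by
  intro l
  induction l with
  | nil => simp
  | cons x xs ih =>
    by_cases h : p x = true <;> simp [List.takeWhile_cons, h] <;> omega

theorem pvInner_spec (cr nl : List Int) :
    ∀ k j, cr.length - j ≤ k →
      pvInner cr (PySem.Set.ofList nl) cr.length j = j + ((cr.drop j).takeWhile (pvKeep nl)).length := by
  intro k
  induction k with
  | zero =>
    intro j hj
    rw [pvInner, dif_neg (by omega)]
    simp [List.drop_eq_nil_of_le (by omega : cr.length ≤ j)]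
  | succ k ih =>
    intro j hj
    by_cases hlt : j < cr.length
    · have hdrop : cr.drop j = cr[j] :: cr.drop (j + 1) := List.drop_eq_getElem_cons hlt
      have hgd : cr.getD j 0 = cr[j] := List.getD_eq_getElem cr 0 hlt
      by_cases hmem : cr[j] ∈ nl
      · rw [pvInner, dif_neg (by simp [List.getElem?_eq_getElem hlt, hmem])]
        rw [hdrop, List.takeWhile_cons]
        simp [pvKeep, hmem]
      · rw [pvInner, dif_pos ⟨hlt, by rw [hgd]; simp [hmem]⟩]
        rw [ih (j + 1) (by omega)]
        rw [hdrop, List.takeWhile_cons]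
        simp [pvKeep, hmem]
        omega
    · rw [pvInner, dif_neg (by omega)]
      simp [List.drop_eq_nil_of_le (by omega : cr.length ≤ j)]

theorem pvOuter_spec (cr nl : List Int) :
    ∀ k i, cr.length - i ≤ k →
      pvOuter cr (PySem.Set.ofList nl) cr.length i = pvSeg nl (cr.drop i) := by
  intro k
  induction k with
  | zero =>
    intro i hi
    rw [pvOuter, dif_neg (by omega)]
    simp [List.drop_eq_nil_of_le (by omega : cr.length ≤ i), pvSeg]
  | succ k ih =>
    intro i hi
    by_cases hlt : i < cr.length
    · have hdrop : cr.drop i = cr[i] :: cr.drop (i + 1) := List.drop_eq_getElem_cons hlt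
      have hgd : cr.getD i 0 = cr[i] := List.getD_eq_getElem cr 0 hlt
      by_cases hmem : cr[i] ∈ nl
      · rw [pvOuter, dif_pos hlt, if_pos (by rw [hgd]; simp [hmem])]
        rw [ih (i + 1) (by omega)]
        rw [hdrop, pvSeg, if_pos hmem]
      · have hj : pvInner cr (PySem.Set.ofList nl) cr.length (i + 1)
            = (i + 1) + ((cr.drop (i + 1)).takeWhile (pvKeep nl)).length :=
          pvInner_spec cr nl (cr.length - (i + 1)) (i + 1) le_rfl
        rw [pvOuter, dif_pos hlt, if_neg (by rw [hgd]; simp [hmem])]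
        rw [hdrop, pvSeg, if_neg hmem]
        have htw : ((cr.drop (i + 1)).takeWhile (pvKeep nl)).length
            ≤ (cr.drop (i + 1)).length := pvLen_takeWhile _ _
        simp only [hj]
        congr 1
        · -- the slice cr[i:j] is the current maximal run
          rw [PySem.List.slice_natCast]
          rw [hdrop]
          rw [show (i + 1 + ((cr.drop (i + 1)).takeWhile (pvKeep nl)).length) - i
              = ((cr.drop (i + 1)).takeWhile (pvKeep nl)).length + 1 by omega]
          rw [List.take_succ_cons]
          rw [pvTake_takeWhile]
        · -- the tail restarts at j = end of the run
          have hlen : (cr.drop (i + 1)).length = cr.length - (i + 1) := List.length_drop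
          rw [ih _ (by omega)]
          congr 1
          rw [show List.drop (i + 1 + ((cr.drop (i + 1)).takeWhile (pvKeep nl)).length) cr
              = List.drop ((cr.drop (i + 1)).takeWhile (pvKeep nl)).length (cr.drop (i + 1)) by
                rw [List.drop_drop]; try (congr 1; omega)]
          rw [pvDrop_takeWhile]
    · rw [pvOuter, dif_neg (by omega)]
      simp [List.drop_eq_nil_of_le (by omega : cr.length ≤ i), pvSeg]

-- A-side: the fold's step function and finisher, named for the lemmas
def pvStep (nl : List Int) (st : List (List Int) × List Int) (node : Int) : List (List Int) × List Int :=
  if node ∉ nl then (st.1, st.2 ++ [node])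
  else if st.2 ≠ [] then (st.1 ++ [st.2], ([] : List Int)) else st

def pvFinish (st : List (List Int) × List Int) : List (List Int) :=
  if st.2 ≠ [] then st.1 ++ [st.2] else st.1

theorem pvFold_segs (nl : List Int) :
    ∀ (r : List Int) (segs : List (List Int)) (cur : List Int),
      r.foldl (pvStep nl) (segs, cur)
        = (segs ++ (r.foldl (pvStep nl) ([], cur)).1, (r.foldl (pvStep nl) ([], cur)).2) := by
  intro r
  induction r with
  | nil => intro segs cur; simp
  | cons x xs ih =>
    intro segs cur
    by_cases hx : x ∈ nl
    · by_cases hc : cur = []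
      · have h1 : ∀ s : List (List Int), pvStep nl (s, cur) x = (s, cur) := by
          intro s; simp [pvStep, hx, hc]
        rw [List.foldl_cons, List.foldl_cons, h1, h1]
        exact ih segs cur
      · have h1 : ∀ s : List (List Int), pvStep nl (s, cur) x = (s ++ [cur], []) := by
          intro s; simp [pvStep, hx, hc]
        rw [List.foldl_cons, List.foldl_cons, h1, h1]
        rw [ih (segs ++ [cur]) [], ih ([] ++ [cur]) []]
        simp
    · have h1 : ∀ s : List (List Int), pvStep nl (s, cur) x = (s, cur ++ [x]) := by
        intro s; simp [pvStep, hx]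
      rw [List.foldl_cons, List.foldl_cons, h1, h1]
      exact ih segs (cur ++ [x])

theorem pvSeg_unfold (nl : List Int) (r : List Int) :
    pvSeg nl r = (if r.takeWhile (pvKeep nl) = [] then [] else [r.takeWhile (pvKeep nl)])
      ++ pvSeg nl (r.dropWhile (pvKeep nl)) := by
  cases r with
  | nil => simp [pvSeg]
  | cons x xs =>
    by_cases hx : x ∈ nl
    · rw [pvSeg, if_pos hx]
      simp [List.takeWhile_cons, List.dropWhile_cons, pvKeep, hx, pvSeg]
    · rw [pvSeg, if_neg hx]
      simp [List.takeWhile_cons, List.dropWhile_cons, pvKeep, hx]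

theorem pvFold_main (nl : List Int) :
    ∀ (r : List Int) (cur : List Int),
      pvFinish (r.foldl (pvStep nl) ([], cur))
        = (if cur ++ r.takeWhile (pvKeep nl) = [] then []
            else [cur ++ r.takeWhile (pvKeep nl)])
          ++ pvSeg nl (r.dropWhile (pvKeep nl)) := by
  intro r
  induction r with
  | nil =>
    intro cur
    by_cases hc : cur = [] <;> simp [pvFinish, pvSeg, hc]
  | cons x xs ih =>
    intro cur
    by_cases hx : x ∈ nl
    · have htw : (x :: xs).takeWhile (pvKeep nl) = [] := by
        simp [List.takeWhile_cons, pvKeep, hx]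
      have hdw : (x :: xs).dropWhile (pvKeep nl) = x :: xs := by
        simp [List.dropWhile_cons, pvKeep, hx]
      rw [htw, hdw]
      have hseg : pvSeg nl (x :: xs) = pvSeg nl xs := by rw [pvSeg, if_pos hx]
      by_cases hc : cur = []
      · subst hc
        rw [List.foldl_cons, show pvStep nl ([], []) x = ([], []) from by simp [pvStep, hx]]
        rw [ih []]
        simp [hseg, pvSeg_unfold nl xs]
      · rw [List.foldl_cons, show pvStep nl ([], cur) x = ([cur], []) from by simp [pvStep, hx, hc]]
        rw [pvFold_segs nl xs [cur] []]
        have hfin : pvFinish ([cur] ++ (xs.foldl (pvStep nl) ([], [])).1, (xs.foldl (pvStep nl) ([], [])).2)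
            = [cur] ++ pvFinish (xs.foldl (pvStep nl) ([], [])) := by
          by_cases h2 : (xs.foldl (pvStep nl) ([], [])).2 = [] <;> simp [pvFinish, h2]
        rw [hfin, ih []]
        simp [hc, hseg, pvSeg_unfold nl xs]
    · have htw : (x :: xs).takeWhile (pvKeep nl) = x :: xs.takeWhile (pvKeep nl) := by
        simp [List.takeWhile_cons, pvKeep, hx]
      have hdw : (x :: xs).dropWhile (pvKeep nl) = xs.dropWhile (pvKeep nl) := by
        simp [List.dropWhile_cons, pvKeep, hx]
      rw [htw, hdw]
      rw [List.foldl_cons, show pvStep nl ([], cur) x = ([], cur ++ [x]) from by simp [pvStep, hx]]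
      rw [ih (cur ++ [x])]
      simp

-- ===== VERDICT (by name: the statement is the Claim_ definition above) =====
theorem remove_edges_given_nodes_spec : Claim_equal_remove_edges_given_nodes := by
  intro cr nl _
  unfold Spec_remove_edges_given_nodes remove_edges_given_nodes remove_edges_given_nodes_alt
  have hA : (if (cr.foldl (pvStep nl) (([], []) : List (List Int) × List Int)).2 ≠ []
        then (cr.foldl (pvStep nl) ([], [])).1 ++ [(cr.foldl (pvStep nl) ([], [])).2]
        else (cr.foldl (pvStep nl) ([], [])).1)
      = pvSeg nl cr := by
    have := pvFold_main nl cr []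
    simp only [List.nil_append] at this
    rw [show (if (cr.foldl (pvStep nl) (([], []) : List (List Int) × List Int)).2 ≠ []
        then (cr.foldl (pvStep nl) ([], [])).1 ++ [(cr.foldl (pvStep nl) ([], [])).2]
        else (cr.foldl (pvStep nl) ([], [])).1) = pvFinish (cr.foldl (pvStep nl) ([], [])) from rfl]
    rw [this, ← pvSeg_unfold]
  have hB : pvOuter cr (PySem.Set.ofList nl) cr.length 0 = pvSeg nl cr := by
    have := pvOuter_spec cr nl cr.length 0 (by omega)
    simpa using this
  rw [hB, ← hA]
  rfl
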